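-- pv_equiv track=rewrite | github.com/bzinberg/playbx_progchal | hailey_functional.py | is_sorted_wrt
-- ===== SOURCE A (Python) =====
-- import collections
-- from functools import reduce
--
-- def is_sorted_wrt(s, p):
--   p_hash = collections.defaultdict(lambda: None)
--   for i in range(len(p)):
--     p_hash[p[i]] = i
--
--   s_index = map(lambda x: p_hash[x], s)
--   s_index_filtered = filter(lambda x: x is not None, s_index)
--   s_index_reduced = reduce(
--       lambda s_tup, x: (s_tup[0] and s_tup[1] <= x, max(s_tup[1], x)),
--       s_index_filtered,
--       (True, 0)
--       )
--
--   return s_index_reduced[0]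
-- ===== SOURCE B (Python) =====
-- def is_sorted_wrt(s, p):
--   pos = {x: i for i, x in enumerate(p)}
--   idxs = [pos[x] for x in s if x in pos]
--   return idxs == sorted(idxs)
-- ===== Notes on version B (the rewrite author's own statement) =====
-- stated objective: alternative
-- what changed: Replaces the defaultdict + map/filter/reduce (ok, max-so-far) fold with extracting the index list via a comprehension and testing monotonicity by comparing it to its sorted copy (idxs == sorted(idxs)).
import Mathlib
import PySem

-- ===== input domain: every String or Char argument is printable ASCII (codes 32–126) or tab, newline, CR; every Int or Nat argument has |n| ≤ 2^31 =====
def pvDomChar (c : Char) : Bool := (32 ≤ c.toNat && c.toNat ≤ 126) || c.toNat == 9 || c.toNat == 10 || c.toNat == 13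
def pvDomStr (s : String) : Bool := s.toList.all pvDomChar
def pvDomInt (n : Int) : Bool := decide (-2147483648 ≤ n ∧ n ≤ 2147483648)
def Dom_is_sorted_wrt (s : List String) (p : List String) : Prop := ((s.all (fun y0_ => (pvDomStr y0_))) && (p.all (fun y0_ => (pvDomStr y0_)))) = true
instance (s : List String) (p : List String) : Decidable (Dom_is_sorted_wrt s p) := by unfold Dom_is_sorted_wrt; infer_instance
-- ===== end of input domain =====

-- B replaces A's map/filter/reduce (ok, max-so-far) fold with a different algorithm:
-- extract the index list and compare it with its sorted copy (objective: alternative, not faster).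

-- ===== PORT A =====
-- p[i] inside the loop is always in range (i ∈ range(len(p))), so pyGetD with a dummy default is exact.
def is_sorted_wrt (s : List String) (p : List String) : Bool :=
  let p_hash := (PySem.List.pyRange 0 (p.length : Int) 1).foldl
      (fun d i => d.insert (PySem.List.pyGetD p i "") i)
      (PySem.Dict.empty : PySem.Dict String Int)
  let s_index := s.map (fun x => p_hash.get? x)
  let s_index_filtered := s_index.filterMap id
  let s_index_reduced := s_index_filtered.foldl
      (fun st x => (st.1 && decide (st.2 ≤ x), max st.2 x)) (true, (0 : Int))
  s_index_reduced.1

-- ===== PORT B =====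
def is_sorted_wrt_alt (s : List String) (p : List String) : Bool :=
  let pos := (PySem.List.enumerate p 0).foldl
      (fun d ix => d.insert ix.2 ix.1)
      (PySem.Dict.empty : PySem.Dict String Int)
  -- [pos[x] for x in s if x in pos]; pos[x] after the guard is a present key, getD 0 is exact
  let idxs := (s.filter (fun x => (pos.get? x).isSome)).map (fun x => (pos.get? x).getD 0)
  idxs == PySem.List.sorted idxs (fun x => x) false

-- ===== PRECONDITION & SPEC =====
def Spec_is_sorted_wrt (s : List String) (p : List String) (out : Bool) : Prop := out = is_sorted_wrt_alt s p
instance (s : List String) (p : List String) (out : Bool) : Decidable (Spec_is_sorted_wrt s p out) := by unfold Spec_is_sorted_wrt; infer_instance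

-- ===== CLAIM (what is proved, stated in full; the proofs are below) =====
def Claim_equal_is_sorted_wrt : Prop := ∀ (s : List String) (p : List String), Dom_is_sorted_wrt s p → Spec_is_sorted_wrt s p (is_sorted_wrt s p)

-- ===== LEMMAS AND PROOFS =====

-- the two dict builds produce the same dict
theorem dict_eq (p : List String) :
    (PySem.List.pyRange 0 (p.length : Int) 1).foldl
        (fun d i => d.insert (PySem.List.pyGetD p i "") i)
        (PySem.Dict.empty : PySem.Dict String Int)
    = (PySem.List.enumerate p 0).foldl
        (fun d ix => d.insert ix.2 ix.1)
        (PySem.Dict.empty : PySem.Dict String Int) := by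
  rw [PySem.List.enumerate_eq_map_pyRange (d := ""), List.foldl_map]
  simp [PySem.List.len]

-- B's filter-then-map extraction is filterMap of the lookup
theorem filter_map_eq (d : PySem.Dict String Int) (s : List String) :
    (s.filter (fun x => (d.get? x).isSome)).map (fun x => (d.get? x).getD 0)
      = s.filterMap d.get? := by
  induction s with
  | nil => rfl
  | cons x xs ih =>
    simp only [List.filter_cons, List.filterMap_cons]
    cases h : d.get? x with
    | none => simpa [h] using ih
    | some v => simpa [h] using ih

-- every value stored by the enumerate-fold is a nonnegative index
theorem dict_vals_nonneg (l : List (Int × String)) (d0 : PySem.Dict String Int)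
    (h0 : ∀ x v, d0.get? x = some v → 0 ≤ v) (hl : ∀ a ∈ l, 0 ≤ a.1) :
    ∀ x v, (l.foldl (fun d ix => d.insert ix.2 ix.1) d0).get? x = some v → 0 ≤ v := by
  induction l generalizing d0 with
  | nil => exact h0
  | cons a l ih =>
    intro x v hv
    refine ih (d0.insert a.2 a.1) ?_ (fun b hb => hl b (List.mem_cons_of_mem _ hb)) x v hv
    intro y w hw
    rw [PySem.Dict.get?_insert] at hw
    split at hw
    · cases hw; exact hl a (List.mem_cons_self ..)
    · exact h0 y w hw

-- A's fold over the filtered index list, phrased as a simple chain check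
def auxGo : List Int → Int → Bool
  | [], _ => true
  | x :: l, last => if x < last then false else auxGo l x

theorem foldl_false (l : List Int) (m : Int) :
    (l.foldl (fun st x => (st.1 && decide (st.2 ≤ x), max st.2 x)) (false, m)).1 = false := by
  induction l generalizing m with
  | nil => rfl
  | cons x l ih => simpa using ih (max m x)

theorem foldl_eq_auxGo (l : List Int) (m : Int) :
    (l.foldl (fun st x => (st.1 && decide (st.2 ≤ x), max st.2 x)) (true, m)).1 = auxGo l m := by
  induction l generalizing m with
  | nil => rfl
  | cons x l ih =>
    simp only [List.foldl_cons, auxGo]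
    by_cases h : m ≤ x
    · have hlt : ¬ x < m := not_lt.mpr h
      simp [h, hlt, ih]
    · have hlt : x < m := lt_of_not_ge h
      simp [h, hlt, foldl_false]

theorem auxGo_iff_pairwise (l : List Int) (last : Int) :
    auxGo l last = true ↔ List.Pairwise (· ≤ ·) (last :: l) := by
  induction l generalizing last with
  | nil => simp [auxGo]
  | cons x l ih =>
    simp only [auxGo]
    split_ifs with h
    · constructor
      · intro hf; exact absurd hf (by simp)
      · intro hp
        exact absurd (List.rel_of_pairwise_cons hp (List.mem_cons_self ..)) (not_le.mpr h)
    · rw [ih]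
      constructor
      · intro hp
        refine List.Pairwise.cons ?_ hp
        intro y hy
        rcases List.mem_cons.mp hy with rfl | hy
        · exact not_lt.mp h
        · exact le_trans (not_lt.mp h) (List.rel_of_pairwise_cons hp hy)
      · intro hp
        exact (List.pairwise_cons.mp hp).2

-- the chain check answers "is l equal to its sorted copy", given nonnegative entries
theorem auxGo_eq_sorted_check (l : List Int) (hnn : ∀ x ∈ l, 0 ≤ x) :
    auxGo l 0 = (l == PySem.List.sorted l (fun x => x) false) := by
  have key : auxGo l 0 = true ↔ l = PySem.List.sorted l (fun x => x) false := by
    rw [auxGo_iff_pairwise, List.pairwise_cons]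
    constructor
    · rintro ⟨-, hp⟩
      exact (PySem.List.sorted_eq_self_of_pairwise (xs := l) (key := fun x => x) hp).symm
    · intro h
      refine ⟨hnn, ?_⟩
      have := PySem.List.sorted_pairwise (xs := l) (key := fun x => x)
      rwa [← h] at this
  cases h : (l == PySem.List.sorted l (fun x => x) false) with
  | true => exact key.mpr (by simpa using h)
  | false =>
    cases hgo : auxGo l 0 with
    | false => rfl
    | true => exact absurd (key.mp hgo) (beq_eq_false_iff_ne.mp h)

-- ===== VERDICT (by name: the statement is the Claim_ definition above) =====
theorem is_sorted_wrt_spec : Claim_equal_is_sorted_wrt := by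
  intro s p _
  unfold Spec_is_sorted_wrt is_sorted_wrt is_sorted_wrt_alt
  simp only [dict_eq p, filter_map_eq, List.filterMap_map, Function.comp_def, id]
  set d := (PySem.List.enumerate p 0).foldl
      (fun d ix => d.insert ix.2 ix.1)
      (PySem.Dict.empty : PySem.Dict String Int) with hd
  rw [foldl_eq_auxGo]
  apply auxGo_eq_sorted_check
  intro x hx
  obtain ⟨y, -, hy⟩ := List.mem_filterMap.mp hx
  refine dict_vals_nonneg _ _ (fun a b hb => by simp [PySem.Dict.get?, PySem.Dict.empty] at hb) ?_ y x hy
  intro a ha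
  obtain ⟨k, hk, rfl⟩ := (PySem.List.mem_enumerate_iff p 0 a).mp ha
  simp
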